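-- pv_equiv track=rewrite | github.com/Fear-Hungry/Job-Shop-Problem | src/local_search/strategies.py | _find_contiguous_blocks
-- ===== SOURCE A (Python) =====
-- def _find_contiguous_blocks(indices):
--     """Encontra blocos contíguos de índices em uma lista.
--
--     Args:
--         indices: Lista de índices ordenados
--
--     Returns:
--         list: Lista de tuplas (início, fim) de blocos contíguos
--     """
--     if not indices:
--         return []
--
--     blocks = []
--     start = indices[0]
--     last = start
--
--     for idx in indices[1:]:
--         if idx == last + 1:
--             last = idx
--         else:
--             blocks.append((start, last))
--             start = idx
--             last = idx
--
--     blocks.append((start, last))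
--     return blocks
-- ===== SOURCE B (Python) =====
-- def _find_contiguous_blocks(indices):
--     """Group sorted indices into contiguous (start, end) blocks.
--
--     Declarative, stateless formulation: a value is a block START iff it has no
--     predecessor or does not extend it by one, and a block END iff it has no
--     successor or the successor does not extend it by one; the k-th start pairs
--     with the k-th end, so zipping the two boundary lists gives the blocks.
--     """
--     starts = [v for p, v in zip([None] + list(indices), indices)
--               if p is None or v != p + 1]
--     ends = [v for v, n in zip(indices, list(indices[1:]) + [None])
--             if n is None or n != v + 1]
--     return list(zip(starts, ends))
-- ===== Notes on version B (the rewrite author's own statement) =====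
-- stated objective: alternative
-- what changed: Replaces the single-pass start/last state machine with a stateless staged computation: one pass detects block starts (no predecessor or value != pred+1), one detects block ends (no successor or succ != value+1), and the two boundary lists are zipped into (start, end) pairs.
import Mathlib
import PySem

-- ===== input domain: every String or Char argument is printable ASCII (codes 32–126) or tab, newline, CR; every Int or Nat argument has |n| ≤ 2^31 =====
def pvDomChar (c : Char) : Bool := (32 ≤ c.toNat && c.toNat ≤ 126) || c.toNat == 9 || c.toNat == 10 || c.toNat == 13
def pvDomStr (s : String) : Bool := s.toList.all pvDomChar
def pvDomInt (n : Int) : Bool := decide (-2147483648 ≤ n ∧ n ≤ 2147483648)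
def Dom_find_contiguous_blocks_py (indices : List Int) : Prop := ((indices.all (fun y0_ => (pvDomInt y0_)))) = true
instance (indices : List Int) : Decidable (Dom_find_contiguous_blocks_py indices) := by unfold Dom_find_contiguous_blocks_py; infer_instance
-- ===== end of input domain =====

-- B replaces A's single-pass start/last state machine with a stateless staged
-- computation: a pass detecting block starts, a pass detecting block ends, zipped.

-- ===== PORT A =====
-- literal transliteration of A: early return on [], then a forward fold over
-- indices[1:] with state (blocks, start, last), appending the final block at the end.
def find_contiguous_blocks_py (indices : List Int) : List (Int × Int) :=
  match indices with
  | [] => []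
  | s :: rest =>
    let st := rest.foldl
      (fun (st : List (Int × Int) × Int × Int) idx =>
        if idx == st.2.2 + 1 then (st.1, st.2.1, idx)
        else (st.1 ++ [(st.2.1, st.2.2)], idx, idx))
      ([], s, s)
    st.1 ++ [(st.2.1, st.2.2)]

-- ===== PORT B =====
-- B-side helpers: the two comprehension filters of Source B
-- (keep v when its predecessor is None or v != p + 1)
def fStart (pv : Option Int × Int) : Option Int :=
  match pv.1 with
  | none => some pv.2
  | some p => if pv.2 ≠ p + 1 then some pv.2 else none
-- (keep v when its successor is None or n != v + 1)
def fEnd (vn : Int × Option Int) : Option Int :=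
  match vn.2 with
  | none => some vn.1
  | some n => if n ≠ vn.1 + 1 then some vn.1 else none

-- literal transliteration of B: starts = [v for p,v in zip([None]+indices, indices) if …],
-- ends = [v for v,n in zip(indices, indices[1:]+[None]) if …], zip(starts, ends).
def find_contiguous_blocks_py_alt (indices : List Int) : List (Int × Int) :=
  let starts := (List.zip ((none : Option Int) :: indices.map some) indices).filterMap fStart
  let ends := (List.zip indices (indices.tail.map some ++ [(none : Option Int)])).filterMap fEnd
  List.zip starts ends

-- ===== PRECONDITION & SPEC =====
def Spec_find_contiguous_blocks_py (indices : List Int) (out : List (Int × Int)) : Prop := out = find_contiguous_blocks_py_alt indices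
instance (indices : List Int) (out : List (Int × Int)) : Decidable (Spec_find_contiguous_blocks_py indices out) := by unfold Spec_find_contiguous_blocks_py; infer_instance

-- ===== CLAIM (what is proved, stated in full; the proofs are below) =====
def Claim_equal_find_contiguous_blocks_py : Prop := ∀ (indices : List Int), Dom_find_contiguous_blocks_py indices → Spec_find_contiguous_blocks_py indices (find_contiguous_blocks_py indices)

-- ===== LEMMAS AND PROOFS =====

-- Reference recursion for A: the blocks produced from current state (start, last)
-- and the remaining input.
def blocksRec (start last : Int) : List Int → List (Int × Int)
  | [] => [(start, last)]
  | idx :: rest =>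
    if idx = last + 1 then blocksRec start idx rest
    else (start, last) :: blocksRec idx idx rest

-- A's loop body, named for the proofs (definitionally the lambda in the port).
def stepA (st : List (Int × Int) × Int × Int) (idx : Int) : List (Int × Int) × Int × Int :=
  if idx == st.2.2 + 1 then (st.1, st.2.1, idx)
  else (st.1 ++ [(st.2.1, st.2.2)], idx, idx)

-- A's fold equals the reference recursion (accumulated blocks come out in front).
theorem foldA_eq_blocksRec (rest : List Int) :
    ∀ (blocks : List (Int × Int)) (start last : Int),
    (rest.foldl stepA (blocks, start, last)).1 ++
      [((rest.foldl stepA (blocks, start, last)).2.1,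
        (rest.foldl stepA (blocks, start, last)).2.2)] = blocks ++ blocksRec start last rest := by
  induction rest with
  | nil => intro blocks start last; simp [blocksRec]
  | cons idx rest ih =>
    intro blocks start last
    by_cases h : idx = last + 1
    · simp only [List.foldl_cons, blocksRec, stepA, h, beq_self_eq_true, if_pos]
      exact ih blocks start (last + 1)
    · simp only [List.foldl_cons, blocksRec, stepA, beq_iff_eq, if_neg h]
      rw [ih (blocks ++ [(start, last)]) idx idx, List.append_assoc]
      rfl

-- Reference recursions for B's two boundary passes.
def startsAux (p : Int) : List Int → List Int
  | [] => []
  | v :: r => (if v ≠ p + 1 then [v] else []) ++ startsAux v r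

def endsAux (v : Int) : List Int → List Int
  | [] => [v]
  | n :: r => (if n ≠ v + 1 then [v] else []) ++ endsAux n r

theorem starts_eq (l : List Int) : ∀ (p : Int),
    (List.zip ((p :: l).map some) l).filterMap fStart = startsAux p l := by
  induction l with
  | nil => intro p; rfl
  | cons v r ih =>
    intro p
    show List.filterMap fStart ((some p, v) :: List.zip ((v :: r).map some) r) = _
    rw [List.filterMap_cons, ih v]
    by_cases h : v = p + 1 <;> simp [fStart, startsAux, h]

theorem ends_eq (l : List Int) : ∀ (v : Int),
    (List.zip (v :: l) (l.map some ++ [(none : Option Int)])).filterMap fEnd = endsAux v l := by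
  induction l with
  | nil => intro v; rfl
  | cons n r ih =>
    intro v
    show List.filterMap fEnd ((v, some n) :: List.zip (n :: r) (r.map some ++ [none])) = _
    rw [List.filterMap_cons, ih n]
    by_cases h : n = v + 1 <;> simp [fEnd, endsAux, h]

-- A's reference recursion is exactly the zip of B's boundary lists.
theorem blocksRec_eq_zip (rest : List Int) : ∀ (start last : Int),
    blocksRec start last rest = List.zip (start :: startsAux last rest) (endsAux last rest) := by
  induction rest with
  | nil => intro start last; rfl
  | cons idx rest ih =>
    intro start last
    by_cases h : idx = last + 1
    · rw [blocksRec, if_pos h, ih start idx]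
      simp [startsAux, endsAux, h]
    · rw [blocksRec, if_neg h, ih idx idx]
      simp [startsAux, endsAux, h, List.zip]

-- ===== VERDICT (by name: the statement is the Claim_ definition above) =====
theorem find_contiguous_blocks_py_spec : Claim_equal_find_contiguous_blocks_py := by
  intro indices _
  show find_contiguous_blocks_py indices = find_contiguous_blocks_py_alt indices
  cases indices with
  | nil => rfl
  | cons s rest =>
    have hA := foldA_eq_blocksRec rest [] s s
    simp only [List.nil_append] at hA
    have hport : find_contiguous_blocks_py (s :: rest) =
        (rest.foldl stepA ([], s, s)).1 ++
          [((rest.foldl stepA ([], s, s)).2.1, (rest.foldl stepA ([], s, s)).2.2)] := rfl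
    have hS : (List.zip ((none : Option Int) :: (s :: rest).map some) (s :: rest)).filterMap fStart
        = s :: startsAux s rest := by
      show List.filterMap fStart ((none, s) :: List.zip ((s :: rest).map some) rest) = _
      rw [List.filterMap_cons, starts_eq rest s]; rfl
    have hB : find_contiguous_blocks_py_alt (s :: rest) =
        List.zip (s :: startsAux s rest) (endsAux s rest) := by
      show List.zip _ _ = _
      rw [hS, List.tail_cons, ends_eq rest s]
    rw [hport, hA, hB, blocksRec_eq_zip rest s s]
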